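-- pv_equiv track=rewrite | github.com/Dekardfirst/tensor_autotest_course_mansurov | Вебинар 5. Словари и функции/task3/task.py | everything_for_your_cat
-- ===== SOURCE A (Python) =====
-- def everything_for_your_cat(cats_data):
--     """Котики и их владельцы
--     :param cats_data: информация о котах и их владельцах
--     :return: информация о котах и их владельцах в виде строки
--     """
--     # todo Здесь нужно написать код
--     owners_data = {}
--     for cat_name, cat_age, owner_name, owner_surname in cats_data:
--         owner_key = f"{owner_name} {owner_surname}"
--         owners_data.setdefault(owner_key, []).append(f"{cat_name}, {cat_age}")
--     result = ""
--     for owner, cats in owners_data.items():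
--         result += f"{owner}: {'; '.join(cats)}\n"
--     return result
-- ===== SOURCE B (Python) =====
-- def everything_for_your_cat(cats_data):
--     owners = []
--     for _cat_name, _cat_age, owner_name, owner_surname in cats_data:
--         key = f"{owner_name} {owner_surname}"
--         if key not in owners:
--             owners.append(key)
--     result = ""
--     for owner in owners:
--         cats = [f"{cat_name}, {cat_age}"
--                 for cat_name, cat_age, owner_name, owner_surname in cats_data
--                 if f"{owner_name} {owner_surname}" == owner]
--         result += f"{owner}: {'; '.join(cats)}\n"
--     return result
-- ===== Notes on version B (the rewrite author's own statement) =====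
-- stated objective: alternative
-- what changed: Replaces the single-pass dict grouping with a two-phase scheme: first collect the distinct owner keys in first-appearance order, then for each owner rescan the whole list to gather that owner's cats in order.
import Mathlib
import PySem

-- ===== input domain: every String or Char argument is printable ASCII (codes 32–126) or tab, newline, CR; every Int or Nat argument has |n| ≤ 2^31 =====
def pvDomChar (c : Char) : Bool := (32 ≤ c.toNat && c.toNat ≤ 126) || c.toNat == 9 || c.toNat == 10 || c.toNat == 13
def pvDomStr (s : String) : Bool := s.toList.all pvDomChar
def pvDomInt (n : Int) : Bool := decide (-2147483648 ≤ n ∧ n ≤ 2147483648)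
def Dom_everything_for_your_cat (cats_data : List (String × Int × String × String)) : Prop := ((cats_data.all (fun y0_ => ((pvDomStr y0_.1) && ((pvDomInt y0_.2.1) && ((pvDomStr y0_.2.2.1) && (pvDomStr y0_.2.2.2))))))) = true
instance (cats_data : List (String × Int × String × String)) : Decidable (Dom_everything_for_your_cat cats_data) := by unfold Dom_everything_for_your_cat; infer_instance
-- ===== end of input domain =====

-- B groups by a two-phase scheme (distinct owner keys first, then a rescan per owner) instead of A's single-pass dict grouping; objective: alternative decomposition.

-- ===== PORT A =====
def everything_for_your_cat (cats_data : List (String × Int × String × String)) : String :=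
  let owners_data : PySem.Dict String (List String) :=
    cats_data.foldl
      (fun d r =>
        d.modify (r.2.2.1 ++ " " ++ r.2.2.2) []
          (fun cs => cs ++ [r.1 ++ ", " ++ PySem.Int.toStr r.2.1]))
      PySem.Dict.empty
  owners_data.items.foldl
    (fun result p => result ++ (p.1 ++ ": " ++ PySem.Str.join "; " p.2 ++ "\n")) ""

-- ===== PORT B =====
def everything_for_your_cat_alt (cats_data : List (String × Int × String × String)) : String :=
  let owners : List String :=
    cats_data.foldl
      (fun acc r =>
        let key := r.2.2.1 ++ " " ++ r.2.2.2
        if key ∈ acc then acc else acc ++ [key]) []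
  owners.foldl
    (fun result owner =>
      let cats :=
        (cats_data.filter (fun r => (r.2.2.1 ++ " " ++ r.2.2.2) == owner)).map
          (fun r => r.1 ++ ", " ++ PySem.Int.toStr r.2.1)
      result ++ (owner ++ ": " ++ PySem.Str.join "; " cats ++ "\n")) ""

-- ===== PRECONDITION & SPEC =====
def Spec_everything_for_your_cat (cats_data : List (String × Int × String × String)) (out : String) : Prop := out = everything_for_your_cat_alt cats_data
instance (cats_data : List (String × Int × String × String)) (out : String) : Decidable (Spec_everything_for_your_cat cats_data out) := by unfold Spec_everything_for_your_cat; infer_instance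

-- ===== CLAIM (what is proved, stated in full; the proofs are below) =====
def Claim_equal_everything_for_your_cat : Prop := ∀ (cats_data : List (String × Int × String × String)), Dom_everything_for_your_cat cats_data → Spec_everything_for_your_cat cats_data (everything_for_your_cat cats_data)

-- ===== LEMMAS AND PROOFS =====

def pvKey (r : String × Int × String × String) : String := r.2.2.1 ++ " " ++ r.2.2.2
def pvEnt (r : String × Int × String × String) : String := r.1 ++ ", " ++ PySem.Int.toStr r.2.1

-- A's dict fold, seen as a fold over (key, entry) pairs
theorem pv_dict_eq (cats : List (String × Int × String × String)) :
    cats.foldl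
      (fun d r =>
        PySem.Dict.modify d (r.2.2.1 ++ " " ++ r.2.2.2) []
          (fun cs => cs ++ [r.1 ++ ", " ++ PySem.Int.toStr r.2.1]))
      PySem.Dict.empty
    = (cats.map (fun r => (pvKey r, pvEnt r))).foldl
        (fun d p => PySem.Dict.modify d p.1 [] (fun cs => cs ++ [p.2])) PySem.Dict.empty := by
  rw [List.foldl_map]
  rfl

theorem pv_keys (cats : List (String × Int × String × String)) :
    (cats.foldl
      (fun d r =>
        PySem.Dict.modify d (r.2.2.1 ++ " " ++ r.2.2.2) []
          (fun cs => cs ++ [r.1 ++ ", " ++ PySem.Int.toStr r.2.1]))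
      PySem.Dict.empty).keys = PySem.Set.ofList (cats.map pvKey) := by
  have hfun : (fun (d : PySem.Dict String (List String)) (r : String × Int × String × String) =>
      d.modify (r.2.2.1 ++ " " ++ r.2.2.2) [] (fun cs => cs ++ [r.1 ++ ", " ++ PySem.Int.toStr r.2.1]))
      = fun d r => d.modify (pvKey r) [] ((fun _ r => (fun cs => cs ++ [pvEnt r])) d r) := rfl
  rw [hfun, PySem.Dict.keys_foldl_modify_key cats (key := pvKey)
        (f := fun _ r => (fun cs => cs ++ [pvEnt r]))]
  simp [PySem.Set.update_nil_left]

theorem pv_owners (cats : List (String × Int × String × String)) :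
    cats.foldl
      (fun acc r =>
        if (r.2.2.1 ++ " " ++ r.2.2.2) ∈ acc then acc else acc ++ [r.2.2.1 ++ " " ++ r.2.2.2]) []
    = PySem.Set.ofList (cats.map pvKey) := by
  have h : (fun (acc : List String) r =>
      if (r.2.2.1 ++ " " ++ r.2.2.2) ∈ acc then acc else acc ++ [r.2.2.1 ++ " " ++ r.2.2.2])
      = fun acc r => PySem.Set.add acc (pvKey r) := by
    funext acc r
    rw [PySem.Set.add_eq_ite]
    rfl
  rw [h, ← PySem.Set.update_map_eq_foldl_add, PySem.Set.update_nil_left]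

theorem pv_getD (cats : List (String × Int × String × String)) (c : String) :
    ((cats.map (fun r => (pvKey r, pvEnt r))).foldl
       (fun d p => PySem.Dict.modify d p.1 [] (fun cs => cs ++ [p.2]))
       PySem.Dict.empty).getD c []
    = (cats.filter (fun r => pvKey r == c)).map pvEnt := by
  rw [PySem.Dict.getD_foldl_modify_append]
  rw [List.filter_map, List.map_map]
  simp [Function.comp_def]

-- ===== VERDICT (by name: the statement is the Claim_ definition above) =====
theorem everything_for_your_cat_spec : Claim_equal_everything_for_your_cat := by
  intro cats _
  unfold Spec_everything_for_your_cat everything_for_your_cat everything_for_your_cat_alt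
  simp only []
  rw [pv_owners]
  set d := cats.foldl
      (fun d r =>
        PySem.Dict.modify d (r.2.2.1 ++ " " ++ r.2.2.2) []
          (fun cs => cs ++ [r.1 ++ ", " ++ PySem.Int.toStr r.2.1]))
      PySem.Dict.empty with hd
  have hnd : d.keys.Nodup := by
    rw [hd, pv_keys]; exact PySem.Set.nodup_ofList _
  have hitems : d.items = d.keys.map (fun k => (k, d.getD k [])) :=
    PySem.Dict.items_eq_map_keys d hnd []
  have hgetD : ∀ c, d.getD c [] = (cats.filter (fun r => pvKey r == c)).map pvEnt := by
    intro c
    rw [hd, pv_dict_eq, pv_getD]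
  have hkeys : d.keys = PySem.Set.ofList (cats.map pvKey) := by rw [hd, pv_keys]
  rw [hitems, List.foldl_map, hkeys]
  have hfun : (fun (result : String) (k : String) =>
        result ++ ((k, d.getD k []).1 ++ ": " ++ PySem.Str.join "; " (k, d.getD k []).2 ++ "\n"))
      = fun result owner =>
        result ++ (owner ++ ": " ++ PySem.Str.join "; "
          ((cats.filter (fun r => (r.2.2.1 ++ " " ++ r.2.2.2) == owner)).map
            (fun r => r.1 ++ ", " ++ PySem.Int.toStr r.2.1)) ++ "\n") := by
    funext result owner
    rw [hgetD owner]
    rfl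
  rw [hfun]
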